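-- pv_equiv track=rewrite | github.com/radio-astro/casa | pipeline/pipeline/hif/tasks/common/arrayflaggerbase.py | channel_ranges
-- ===== SOURCE A (Python) =====
-- def channel_ranges(channels):
--     """
--     Given a list of channels will return a list of
--     ranges that describe them.
--     """
--     channels.sort()
--     range = [channels[0], channels[0]]
--
--     for i,chan in enumerate(channels):
--         if chan <= range[1] + 1:
--             range[1] = chan
--         else:
--             return [range] + channel_ranges(channels[i:])
--
--     # get here if last channel reached
--     return [range]
-- ===== SOURCE B (Python) =====
-- def channel_ranges(channels):
--     """
--     Given a list of channels will return a list of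
--     ranges that describe them.
--     """
--     out = []
--     for c in sorted(channels):
--         if out and c <= out[-1][1] + 1:
--             out[-1][1] = c
--         else:
--             out.append([c, c])
--     return out
-- ===== Notes on version B (the rewrite author's own statement) =====
-- stated objective: faster
-- what changed: A restarts itself recursively at every gap, re-sorting and slicing the remaining suffix each time; B sorts once and builds all ranges in one linear pass with an accumulator.
import Mathlib
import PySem

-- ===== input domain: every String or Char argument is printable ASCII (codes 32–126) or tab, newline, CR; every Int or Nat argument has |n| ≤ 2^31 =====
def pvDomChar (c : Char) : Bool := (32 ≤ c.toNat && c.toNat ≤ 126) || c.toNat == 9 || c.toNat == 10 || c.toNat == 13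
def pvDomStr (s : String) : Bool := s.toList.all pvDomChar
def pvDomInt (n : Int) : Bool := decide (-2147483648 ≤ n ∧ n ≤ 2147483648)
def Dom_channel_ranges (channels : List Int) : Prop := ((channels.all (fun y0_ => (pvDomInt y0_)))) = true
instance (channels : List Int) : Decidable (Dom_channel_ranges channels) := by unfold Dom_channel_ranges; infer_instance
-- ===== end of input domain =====

-- B replaces A's recursive restart (re-sort + slice at every gap) by one sort and a single
-- linear accumulator pass; objective: faster. Python A sorts `channels` in place (a caller-visible
-- mutation B does not perform); the equivalence proved here is about the RETURN value only.

-- ===== PORT A =====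
-- A's for-loop up to the first gap: either the whole list is consumed (final range lo..hi),
-- or it stops at the first element c > hi+1 and returns the current range plus the suffix
-- channels[i:] (which in A is fed back into channel_ranges).
def splitA (lo hi : Int) : List Int → (Int × Int) ⊕ (Int × Int × List Int)
  | [] => Sum.inl (lo, hi)
  | c :: rs => if c ≤ hi + 1 then splitA lo c rs else Sum.inr (lo, hi, c :: rs)

theorem splitA_suffix_length (lo hi : Int) : ∀ (l suf : List Int) (a b : Int),
    splitA lo hi l = Sum.inr (a, b, suf) → suf.length ≤ l.length := by
  intro l
  induction l generalizing lo hi with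
  | nil => intro suf a b h; simp [splitA] at h
  | cons c rs ih =>
    intro suf a b h
    by_cases hc : c ≤ hi + 1
    · simp [splitA, hc] at h
      exact Nat.le_succ_of_le (ih lo c suf a b h)
    · simp [splitA, hc] at h
      simp [h.2.2]

def channel_ranges (channels : List Int) : List (List Int) :=
  match hs : PySem.List.sorted channels (fun x => x) with
  | [] => []  -- Python raises IndexError (channels[0]) here; excluded by Pre_channel_ranges
  | c0 :: rest =>
    match hsp : splitA c0 c0 rest with
    | Sum.inl (lo, hi) => [[lo, hi]]
    | Sum.inr (lo, hi, suffix) => [[lo, hi]] ++ channel_ranges suffix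
termination_by channels.length
decreasing_by
  have h1 : suffix.length ≤ rest.length := splitA_suffix_length c0 c0 rest suffix lo hi hsp
  have h2 : (PySem.List.sorted channels (fun x => x)).length = channels.length :=
    PySem.List.length_sorted channels (fun x => x) false
  rw [hs] at h2
  simp at h2
  omega

-- ===== PORT B =====
-- B's loop body: `out` kept in reverse, head = out[-1].
def stepB (acc : List (Int × Int)) (c : Int) : List (Int × Int) :=
  match acc with
  | (lo, hi) :: rest => if c ≤ hi + 1 then (lo, c) :: rest else (c, c) :: (lo, hi) :: rest
  | [] => [(c, c)]

def channel_ranges_alt (channels : List Int) : List (List Int) :=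
  (((PySem.List.sorted channels (fun x => x)).foldl stepB []).reverse).map (fun p => [p.1, p.2])

-- ===== PRECONDITION & SPEC =====
-- Pre_ excludes only the empty list, on which Python A raises IndexError (channels[0]).
def Pre_channel_ranges (channels : List Int) : Prop := channels ≠ []
instance (channels : List Int) : Decidable (Pre_channel_ranges channels) := by unfold Pre_channel_ranges; infer_instance
def pvWitness_channel_ranges : List Int := ([0, 1, 5])

def Spec_channel_ranges (channels : List Int) (out : List (List Int)) : Prop := out = channel_ranges_alt channels
instance (channels : List Int) (out : List (List Int)) : Decidable (Spec_channel_ranges channels out) := by unfold Spec_channel_ranges; infer_instance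

-- ===== CLAIM (what is proved, stated in full; the proofs are below) =====
def Claim_equal_channel_ranges : Prop := ∀ (channels : List Int), Dom_channel_ranges channels → Pre_channel_ranges channels → Spec_channel_ranges channels (channel_ranges channels)

-- ===== LEMMAS AND PROOFS =====

-- B's fold without the sort (the top-level list is already sorted when it is applied).
def fB (s : List Int) : List (List Int) := ((s.foldl stepB []).reverse).map (fun p => [p.1, p.2])

theorem splitA_suffix (lo hi : Int) : ∀ (l suf : List Int) (a b : Int),
    splitA lo hi l = Sum.inr (a, b, suf) → suf.Sublist l := by
  intro l
  induction l generalizing lo hi with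
  | nil => intro suf a b h; simp [splitA] at h
  | cons c rs ih =>
    intro suf a b h
    by_cases hc : c ≤ hi + 1
    · simp [splitA, hc] at h
      exact List.Sublist.cons c (ih lo c suf a b h)
    · simp [splitA, hc] at h
      rw [h.2.2]

theorem foldl_split (rest : List Int) : ∀ (lo hi : Int) (acc : List (Int × Int)),
    List.foldl stepB ((lo, hi) :: acc) rest =
      (match splitA lo hi rest with
       | Sum.inl p => p :: acc
       | Sum.inr (lo', hi', suf) => List.foldl stepB ((lo', hi') :: acc) suf) := by
  induction rest with
  | nil => intro lo hi acc; simp [splitA]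
  | cons c rs ih =>
    intro lo hi acc
    by_cases hc : c ≤ hi + 1
    · simp [splitA, hc, List.foldl, stepB]
      exact ih lo c acc
    · simp [splitA, hc]

theorem foldl_stepB_append (rs : List Int) : ∀ (p : Int × Int) (acc tail : List (Int × Int)),
    List.foldl stepB ((p :: acc) ++ tail) rs = (List.foldl stepB (p :: acc) rs) ++ tail := by
  induction rs with
  | nil => intro p acc tail; rfl
  | cons c t ih =>
    intro p acc tail
    obtain ⟨lo, hi⟩ := p
    by_cases hc : c ≤ hi + 1
    · simp [List.foldl, stepB, hc]
      exact ih (lo, c) acc tail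
    · simp [List.foldl, stepB, hc]
      exact ih (c, c) ((lo, hi) :: acc) tail

theorem splitA_inr_shape (lo hi : Int) : ∀ (l suf : List Int) (a b : Int),
    splitA lo hi l = Sum.inr (a, b, suf) → ∃ c rs, suf = c :: rs ∧ ¬ c ≤ b + 1 := by
  intro l
  induction l generalizing lo hi with
  | nil => intro suf a b h; simp [splitA] at h
  | cons d ds ih =>
    intro suf a b h
    by_cases hd : d ≤ hi + 1
    · simp [splitA, hd] at h
      exact ih lo d suf a b h
    · simp [splitA, hd] at h
      exact ⟨d, ds, by simp [h.2.2], h.2.1 ▸ hd⟩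

theorem channel_ranges_nil : channel_ranges [] = [] := by
  have h : PySem.List.sorted ([] : List Int) (fun x => x) = [] := by
    simp [PySem.List.sorted_eq_nil_iff]
  rw [channel_ranges, h]

theorem key_lemma : ∀ (n : Nat) (s : List Int), s.length ≤ n → s.Pairwise (· ≤ ·) →
    channel_ranges s = fB s := by
  intro n
  induction n with
  | zero =>
    intro s hlen _
    have : s = [] := List.eq_nil_of_length_eq_zero (Nat.le_zero.mp hlen)
    subst this
    rw [channel_ranges_nil]; rfl
  | succ n ih =>
    intro s hlen hpw
    cases s with
    | nil => rw [channel_ranges_nil]; rfl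
    | cons c0 rest =>
      have hsort : PySem.List.sorted (c0 :: rest) (fun x => x) = c0 :: rest :=
        PySem.List.sorted_eq_self_of_pairwise _ (fun x => x) hpw
      rw [channel_ranges, hsort]
      dsimp only
      unfold fB
      match hsp : splitA c0 c0 rest with
      | Sum.inl (lo, hi) =>
        simp only [List.foldl]
        have h0 : stepB [] c0 = [(c0, c0)] := rfl
        rw [h0, foldl_split rest c0 c0 [], hsp]
        rfl
      | Sum.inr (lo, hi, suffix) =>
        -- suffix is a sublist of rest, hence sorted and shorter
        have hsub := splitA_suffix c0 c0 rest suffix lo hi hsp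
        have hpws : suffix.Pairwise (· ≤ ·) := (List.pairwise_cons.mp hpw).2.sublist hsub
        have hls : suffix.length ≤ n := by
          have := hsub.length_le
          simp at hlen
          omega
        have hrec := ih suffix hls hpws
        obtain ⟨c, rs, hsuf, hgap⟩ := splitA_inr_shape c0 c0 rest suffix lo hi hsp
        rw [hsuf] at hrec
        simp only [List.foldl]
        have h0 : stepB [] c0 = [(c0, c0)] := rfl
        rw [h0, foldl_split rest c0 c0 [], hsp, hsuf]
        simp only [List.foldl, stepB, if_neg hgap]
        have happ := foldl_stepB_append rs (c, c) [] [(lo, hi)]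
        simp at happ
        rw [happ, hrec]
        simp [fB, stepB]

-- channel_ranges of any list equals channel_ranges of its sorted version (A sorts first).
theorem channel_ranges_eq_sorted (channels : List Int) :
    channel_ranges channels = channel_ranges (PySem.List.sorted channels (fun x => x)) := by
  conv_rhs => rw [channel_ranges]
  rw [PySem.List.sorted_sorted]
  rw [channel_ranges]

-- ===== VERDICT (by name: the statement is the Claim_ definition above) =====
theorem channel_ranges_spec : Claim_equal_channel_ranges := by
  intro channels _ _
  unfold Spec_channel_ranges channel_ranges_alt
  rw [channel_ranges_eq_sorted]
  exact key_lemma (PySem.List.sorted channels (fun x => x)).length _ (le_refl _)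
    (PySem.List.sorted_pairwise channels (fun x => x))
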